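-- pv_equiv track=rewrite | github.com/BinghZhengg/Projects | Data Science/A-Priori Algorithm/armin.py | reference_sets
-- ===== SOURCE A (Python) =====
-- def reference_sets(market_basket_dictionary, unique_items):
--
--     reference = {}
--
--     for i in unique_items:
--         temp = []
--         for key, value in market_basket_dictionary.items():
--             if i in value:
--                 temp.append(key)
--         reference[i] = set(temp)
--
--     return reference
-- ===== SOURCE B (Python) =====
-- def reference_sets(market_basket_dictionary, unique_items):
--     # Build a full inverted index (item -> set of basket keys) in ONE pass over
--     # the baskets via setdefault, then assemble the answer with a dict
--     # comprehension over unique_items (missing items get an empty set).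
--     index = {}
--     for key, value in market_basket_dictionary.items():
--         for i in value:
--             index.setdefault(i, set()).add(key)
--     return {i: index.get(i, set()) for i in unique_items}
-- ===== Notes on version B (the rewrite author's own statement) =====
-- stated objective: faster
-- what changed: A rescans every basket once per unique item; B builds a complete inverted index (item -> set of basket keys) in a single pass over the baskets with setdefault, then assembles the result by one dictionary-comprehension lookup per unique item.
import Mathlib
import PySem

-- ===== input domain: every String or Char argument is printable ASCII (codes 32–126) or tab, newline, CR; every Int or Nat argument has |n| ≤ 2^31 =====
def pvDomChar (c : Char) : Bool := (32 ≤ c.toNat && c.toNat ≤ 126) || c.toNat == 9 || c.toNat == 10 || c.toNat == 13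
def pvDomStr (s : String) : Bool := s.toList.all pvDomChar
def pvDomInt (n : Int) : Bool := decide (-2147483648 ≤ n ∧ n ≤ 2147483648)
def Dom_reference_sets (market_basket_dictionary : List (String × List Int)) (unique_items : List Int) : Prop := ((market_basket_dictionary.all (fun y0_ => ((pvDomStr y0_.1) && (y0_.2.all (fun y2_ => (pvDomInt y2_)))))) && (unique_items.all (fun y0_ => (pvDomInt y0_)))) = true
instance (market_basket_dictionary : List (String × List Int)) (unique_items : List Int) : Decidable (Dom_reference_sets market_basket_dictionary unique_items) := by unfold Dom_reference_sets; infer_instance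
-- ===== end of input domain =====

-- B replaces A's per-item rescans of all baskets by one pass over the baskets
-- building a complete inverted index, then a per-item lookup; objective: faster.

-- ===== PORT A =====
def reference_sets (market_basket_dictionary : List (String × List Int)) (unique_items : List Int) : List (Int × List String) :=
  let reference : PySem.Dict Int (List String) :=
    unique_items.foldl
      (fun ref i =>
        let temp : List String :=
          market_basket_dictionary.foldl
            (fun temp kv => if kv.2.contains i then temp ++ [kv.1] else temp) []
        ref.insert i (PySem.Set.ofList temp))
      PySem.Dict.empty
  reference.items

-- ===== PORT B =====
-- 'index.setdefault(i, set()).add(key)' (in-place add on the set returned by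
-- setdefault, i.e. index[i] = index.get(i, set()) with key added) is exactly
-- Dict.modify i Set.empty (add · key).
def reference_sets_alt (market_basket_dictionary : List (String × List Int)) (unique_items : List Int) : List (Int × List String) :=
  let index : PySem.Dict Int (List String) :=
    market_basket_dictionary.foldl
      (fun index kv =>
        kv.2.foldl (fun index i => index.modify i PySem.Set.empty (fun s => PySem.Set.add s kv.1)) index)
      PySem.Dict.empty
  (unique_items.foldl
      (fun out i => out.insert i (index.getD i PySem.Set.empty))
      PySem.Dict.empty).items

-- ===== PRECONDITION & SPEC =====
def Spec_reference_sets (market_basket_dictionary : List (String × List Int)) (unique_items : List Int) (out : List (Int × List String)) : Prop := out = reference_sets_alt market_basket_dictionary unique_items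
instance (market_basket_dictionary : List (String × List Int)) (unique_items : List Int) (out : List (Int × List String)) : Decidable (Spec_reference_sets market_basket_dictionary unique_items out) := by unfold Spec_reference_sets; infer_instance

-- ===== CLAIM (what is proved, stated in full; the proofs are below) =====
def Claim_equal_reference_sets : Prop := ∀ (market_basket_dictionary : List (String × List Int)) (unique_items : List Int), Dom_reference_sets market_basket_dictionary unique_items → Spec_reference_sets market_basket_dictionary unique_items (reference_sets market_basket_dictionary unique_items)

-- ===== LEMMAS AND PROOFS =====

-- A loop inserting (i, F i) for each i in l, starting from a dict whose items are
-- exactly (i, F i) over a Nodup key list S, ends with items over Set.update S l.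
lemma pv_items_insert_const (F : Int → List String) :
    ∀ (l S : List Int) (d : PySem.Dict Int (List String)), S.Nodup →
      d.items = S.map (fun i => (i, F i)) →
      (l.foldl (fun d i => d.insert i (F i)) d).items
        = (PySem.Set.update S l).map (fun i => (i, F i)) := by
  intro l
  induction l with
  | nil => intro S d _ hd; simpa [PySem.Set.update] using hd
  | cons x l ih =>
      intro S d hS hd
      have hkeys : d.keys = S := by
        simp [PySem.Dict.keys, hd, Function.comp_def]
      have hcont : d.contains x = decide (x ∈ S) := by
        rw [PySem.Dict.contains_eq_decide_mem_keys, hkeys]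
      rw [List.foldl_cons, PySem.Set.update_cons]
      by_cases hx : x ∈ S
      · have hc : d.contains x = true := by simp [hcont, hx]
        have hadd : PySem.Set.add S x = S := by
          simp [PySem.Set.add, PySem.Set.contains, hx]
        have hitems : (d.insert x (F x)).items = S.map (fun i => (i, F i)) := by
          rw [PySem.Dict.items_insert_of_contains d (F x) hc, hd, List.map_map]
          refine List.map_congr_left ?_
          intro i _
          by_cases hix : i = x
          · subst hix; simp
          · simp [Function.comp, hix]
        rw [hadd]
        exact ih S _ hS hitems
      · have hc : d.contains x = false := by simp [hcont, hx]
        have hadd : PySem.Set.add S x = S ++ [x] := by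
          simp [PySem.Set.add, PySem.Set.contains, hx]
        have hitems : (d.insert x (F x)).items = (S ++ [x]).map (fun i => (i, F i)) := by
          rw [PySem.Dict.items_insert_of_not_contains d (F x) hc, hd]; simp
        have hnd : (S ++ [x]).Nodup := by
          simp only [List.nodup_append, List.nodup_singleton, true_and]
          refine ⟨hS, ?_⟩
          intro a ha b hb
          simp only [List.mem_singleton] at hb
          subst hb
          exact fun h => hx (h ▸ ha)
        rw [hadd]
        exact ih (S ++ [x]) _ hnd hitems

-- Value at key i after B's inner loop (one basket's items, setdefault+add).
lemma pv_getD_inner (key : String) (vals : List Int) :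
    ∀ (d : PySem.Dict Int (List String)) (i : Int),
      (vals.foldl (fun d j => d.modify j PySem.Set.empty (fun s => PySem.Set.add s key)) d).getD i PySem.Set.empty
        = if i ∈ vals then PySem.Set.add (d.getD i PySem.Set.empty) key
          else d.getD i PySem.Set.empty := by
  induction vals with
  | nil => intro d i; simp
  | cons j vals ih =>
      intro d i
      rw [List.foldl_cons, ih, PySem.Dict.getD_modify]
      by_cases hij : i = j
      · subst hij
        by_cases hv : i ∈ vals <;> simp [hv]
      · by_cases hv : i ∈ vals <;> simp [hij, hv]

-- Value at key i after B's whole index-building loop.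
lemma pv_getD_index (mbd : List (String × List Int)) :
    ∀ (d : PySem.Dict Int (List String)) (i : Int),
      (mbd.foldl
        (fun d kv =>
          kv.2.foldl (fun d j => d.modify j PySem.Set.empty (fun s => PySem.Set.add s kv.1)) d)
        d).getD i PySem.Set.empty
        = mbd.foldl (fun s kv => if i ∈ kv.2 then PySem.Set.add s kv.1 else s)
            (d.getD i PySem.Set.empty) := by
  induction mbd with
  | nil => intro d i; rfl
  | cons kv mbd ih =>
      intro d i
      rw [List.foldl_cons, List.foldl_cons, ih, pv_getD_inner]

-- The filtered/deduplicated basket keys of item i, as both programs produce them.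
lemma pv_value_eq (mbd : List (String × List Int)) (i : Int) :
    PySem.Set.ofList ((mbd.filter (fun kv => kv.2.contains i)).map (fun kv => kv.1))
      = mbd.foldl (fun s kv => if i ∈ kv.2 then PySem.Set.add s kv.1 else s) [] := by
  rw [PySem.Set.ofList_eq_foldl, List.foldl_map, List.foldl_filter]
  congr 1
  funext s kv
  by_cases h : i ∈ kv.2 <;> simp [h]

-- ===== VERDICT (by name: the statement is the Claim_ definition above) =====
theorem reference_sets_spec : Claim_equal_reference_sets := by
  intro mbd u _
  unfold Spec_reference_sets reference_sets reference_sets_alt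
  -- A's accumulation body rewritten as filter+map
  have hbodyA : (fun (ref : PySem.Dict Int (List String)) (i : Int) =>
      ref.insert i (PySem.Set.ofList
        (mbd.foldl (fun temp kv => if kv.2.contains i then temp ++ [kv.1] else temp) [])))
    = (fun (ref : PySem.Dict Int (List String)) (i : Int) =>
      ref.insert i (PySem.Set.ofList
        ((mbd.filter (fun kv => kv.2.contains i)).map (fun kv => kv.1)))) := by
    funext ref i
    rw [PySem.List.foldl_append_if (fun kv => kv.2.contains i) (fun kv => kv.1) mbd [],
        List.nil_append]
  have hA := pv_items_insert_const
    (fun i => PySem.Set.ofList ((mbd.filter (fun kv => kv.2.contains i)).map (fun kv => kv.1)))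
    u [] PySem.Dict.empty (by simp) (by rfl)
  rw [PySem.Set.update_nil_left] at hA
  -- B's output dict
  set index := mbd.foldl
      (fun d kv =>
        kv.2.foldl (fun d j => d.modify j PySem.Set.empty (fun s => PySem.Set.add s kv.1)) d)
      PySem.Dict.empty with hindex
  have hB := pv_items_insert_const
    (fun i => index.getD i PySem.Set.empty)
    u [] PySem.Dict.empty (by simp) (by rfl)
  rw [PySem.Set.update_nil_left] at hB
  simp only [hbodyA]
  rw [hA, hB]
  refine List.map_congr_left ?_
  intro i _
  have hg : index.getD i PySem.Set.empty
      = mbd.foldl (fun s kv => if i ∈ kv.2 then PySem.Set.add s kv.1 else s) [] := by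
    rw [hindex, pv_getD_index]
    simp [PySem.Set.empty]
  simp only [hg, pv_value_eq]
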